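-- pv_equiv track=rewrite | github.com/Semicide/CodeStepByStep_Python_Solutions | second_half_letters.py | second_half_letters
-- ===== SOURCE A (Python) =====
-- def second_half_letters(x):
--     alphabet=["n","o","p","q","r","s","t","u","v","w","x","y","z"]
--     a=x.lower()
--     syc=0
--     shl=0
--     for i in range(len(a)):
--         if(a[i] not in alphabet):
--             syc +=1
--         else:
--             shl +=1
--     return shl
-- ===== SOURCE B (Python) =====
-- def second_half_letters(x):
--     freq = {}
--     for c in x.lower():
--         freq[c] = freq.get(c, 0) + 1
--     return sum(freq.get(c, 0) for c in "nopqrstuvwxyz")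
-- ===== Notes on version B (the rewrite author's own statement) =====
-- stated objective: alternative
-- what changed: B builds a frequency table of the lowered string in one tally pass and then sums the counts of the thirteen fixed second-half-alphabet letters, instead of A's per-character list-membership test with two running counters.
import Mathlib
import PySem

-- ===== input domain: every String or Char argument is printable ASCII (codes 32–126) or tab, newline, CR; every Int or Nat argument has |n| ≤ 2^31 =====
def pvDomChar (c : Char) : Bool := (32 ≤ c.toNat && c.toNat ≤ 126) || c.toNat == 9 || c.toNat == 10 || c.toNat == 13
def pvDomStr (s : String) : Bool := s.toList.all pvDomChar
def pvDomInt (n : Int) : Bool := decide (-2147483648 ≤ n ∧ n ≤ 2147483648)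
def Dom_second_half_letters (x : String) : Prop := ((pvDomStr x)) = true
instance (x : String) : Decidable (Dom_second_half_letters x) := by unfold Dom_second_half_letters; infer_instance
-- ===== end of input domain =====

-- B tallies the lowered string into a frequency dict once and sums the counts of the
-- thirteen second-half alphabet letters (alternative decomposition; return value only).

-- ===== PORT A =====
def second_half_letters (x : String) : Int :=
  let alphabet : List Char := ['n','o','p','q','r','s','t','u','v','w','x','y','z']
  let a := PySem.Str.lower x
  let r := (PySem.List.pyRange 0 (PySem.Str.len a) 1).foldl
      (fun (st : Int × Int) i =>
        if ¬ (PySem.List.pyGetD a.toList i ' ' ∈ alphabet) then (st.1 + 1, st.2)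
        else (st.1, st.2 + 1)) (0, 0)
  r.2

-- ===== PORT B =====
def second_half_letters_alt (x : String) : Int :=
  let freq : PySem.Dict Char Int :=
    (PySem.Str.lower x).toList.foldl
      (fun (d : PySem.Dict Char Int) c => d.insert c (d.getD c 0 + 1)) PySem.Dict.empty
  ("nopqrstuvwxyz".toList).foldl (fun s c => s + freq.getD c 0) 0

-- ===== PRECONDITION & SPEC =====
def Spec_second_half_letters (x : String) (out : Int) : Prop := out = second_half_letters_alt x
instance (x : String) (out : Int) : Decidable (Spec_second_half_letters x out) := by unfold Spec_second_half_letters; infer_instance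

-- ===== CLAIM (what is proved, stated in full; the proofs are below) =====
def Claim_equal_second_half_letters : Prop := ∀ (x : String), Dom_second_half_letters x → Spec_second_half_letters x (second_half_letters x)

-- ===== LEMMAS AND PROOFS =====

-- A's two-counter fold: the second component counts the members of `alph`.
theorem pv_foldA (alph : List Char) :
    ∀ (chars : List Char) (s t : Int),
      ((chars.foldl
        (fun (st : Int × Int) c =>
          if ¬ (c ∈ alph) then (st.1 + 1, st.2) else (st.1, st.2 + 1)) (s, t)).2)
        = t + (chars.countP (fun c => decide (c ∈ alph)) : Int) := by
  intro chars
  induction chars with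
  | nil => intro s t; simp
  | cons c rest ih =>
    intro s t
    rw [List.foldl_cons]
    by_cases hc : c ∈ alph
    · rw [if_neg (by simp [hc]), ih]
      simp [hc]
      ring
    · rw [if_pos (by simp [hc]), ih]
      simp [hc]

-- Splitting a membership count at a fresh head of the target list.
theorem pv_countP_cons_target (t : Char) (ts : List Char) (ht : t ∉ ts) :
    ∀ chars : List Char,
      chars.countP (fun c => decide (c ∈ t :: ts))
        = chars.count t + chars.countP (fun c => decide (c ∈ ts)) := by
  intro chars
  induction chars with
  | nil => simp
  | cons c rest ih =>
    simp only [List.countP_cons, List.count_cons, List.mem_cons] at ih ⊢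
    by_cases hc : c = t
    · subst hc
      simp only [ht, decide_false] at ih ⊢
      simp at ih ⊢
      omega
    · by_cases hm : c ∈ ts <;> simp [hc, hm] at ih ⊢ <;> omega

-- B's summation fold over distinct targets equals the membership count.
theorem pv_foldB (ts : List Char) (hn : ts.Nodup) (chars : List Char) :
    ∀ s : Int,
      ts.foldl (fun s c => s + (chars.count c : Int)) s
        = s + (chars.countP (fun c => decide (c ∈ ts)) : Int) := by
  induction ts with
  | nil => intro s; simp
  | cons t rest ih =>
    intro s
    rcases List.nodup_cons.mp hn with ⟨ht, hrest⟩
    rw [List.foldl_cons, ih hrest, pv_countP_cons_target t rest ht chars]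
    push_cast
    ring

-- ===== VERDICT (by name: the statement is the Claim_ definition above) =====
theorem second_half_letters_spec : Claim_equal_second_half_letters := by
  intro x _
  unfold Spec_second_half_letters second_half_letters second_half_letters_alt
  simp only [PySem.Str.len_eq,
    PySem.Dict.foldl_insert_getD_add_one_eq_counter, PySem.Dict.getD_counter,
    PySem.Str.toList_lower]
  rw [PySem.List.foldl_pyRange_zero_pyGetD' (PySem.Chars.lower x.toList) ' '
      (fun (st : Int × Int) c =>
        if ¬ (c ∈ ['n','o','p','q','r','s','t','u','v','w','x','y','z']) then (st.1 + 1, st.2)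
        else (st.1, st.2 + 1)) (0, 0)]
  rw [pv_foldA, pv_foldB _ (by decide)]
  simp
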